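-- pv_equiv track=rewrite | github.com/aorursy/new-nb-3 | gaussmake1994_catboost-on-category-baseline.py | category_split
-- ===== SOURCE A (Python) =====
-- def category_split(category):
--
--     parts = map(str.strip, category.split('/'))
--
--     result = []
--
--     previous = ""
--
--     for part in parts:
--
--         result.append("{0}_{1}".format(previous, part))
--
--         previous = result[-1]
--
--     return result
-- ===== SOURCE B (Python) =====
-- def category_split(category):
--     parts = [p.strip() for p in category.split('/')]
--     return ["_" + "_".join(parts[:i + 1]) for i in range(len(parts))]
-- ===== Notes on version B (the rewrite author's own statement) =====
-- stated objective: simpler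
-- what changed: Replaces the accumulator loop (previous string threaded through list appends) with a comprehension deriving each element independently by underscore-joining a prefix of the stripped parts.
import Mathlib
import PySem

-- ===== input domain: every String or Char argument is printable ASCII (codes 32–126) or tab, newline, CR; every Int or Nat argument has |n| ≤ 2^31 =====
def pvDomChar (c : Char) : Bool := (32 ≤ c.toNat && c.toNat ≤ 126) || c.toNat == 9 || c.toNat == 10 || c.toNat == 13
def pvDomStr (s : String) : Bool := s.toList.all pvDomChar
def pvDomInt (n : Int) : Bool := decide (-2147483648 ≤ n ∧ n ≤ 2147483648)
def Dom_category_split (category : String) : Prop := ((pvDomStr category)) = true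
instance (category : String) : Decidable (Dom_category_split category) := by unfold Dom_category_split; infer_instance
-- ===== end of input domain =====

-- B replaces A's running-accumulator loop by deriving each element independently
-- (underscore-joining a prefix of the stripped parts); objective: simpler.

-- ===== PORT A =====
-- one loop step: append "{previous}_{part}" and make it the new previous
def pvStepA (st : List (List Char) × List Char) (part : List Char) :
    List (List Char) × List Char :=
  let s := st.2 ++ '_' :: part
  (st.1 ++ [s], s)

def category_split (category : String) : List String :=
  let parts := (PySem.Chars.splitOn category.toList ['/']).map PySem.Chars.strip
  ((parts.foldl pvStepA ([], [])).1).map String.ofList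

-- ===== PORT B =====
def category_split_alt (category : String) : List String :=
  let parts := (PySem.Chars.splitOn category.toList ['/']).map PySem.Chars.strip
  (List.range parts.length).map
    (fun i => String.ofList ('_' :: PySem.Chars.join ['_'] (parts.take (i + 1))))

-- ===== PRECONDITION & SPEC =====
def Spec_category_split (category : String) (out : List String) : Prop := out = category_split_alt category
instance (category : String) (out : List String) : Decidable (Spec_category_split category out) := by unfold Spec_category_split; infer_instance

-- ===== CLAIM (what is proved, stated in full; the proofs are below) =====
def Claim_equal_category_split : Prop := ∀ (category : String), Dom_category_split category → Spec_category_split category (category_split category)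

-- ===== LEMMAS AND PROOFS =====

lemma pvFold_eq (ps : List (List Char)) :
    ∀ (acc : List (List Char)) (prev : List Char),
      (ps.foldl pvStepA (acc, prev)).1 =
        acc ++ (List.range ps.length).map
          (fun i => prev ++ '_' :: PySem.Chars.join ['_'] (ps.take (i + 1))) := by
  induction ps with
  | nil => intro acc prev; simp
  | cons p rest ih =>
    intro acc prev
    simp only [List.foldl_cons, pvStepA, List.length_cons, List.range_succ_eq_map,
      List.map_cons, List.map_map]
    rw [ih]
    simp only [List.append_assoc, List.singleton_append, List.take_succ_cons]
    congr 1
    congr 1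
    · simp [PySem.Chars.join_singleton]
    · apply List.map_congr_left
      intro i hi
      simp only [List.mem_range] at hi
      have hne : rest.take (i + 1) ≠ [] := by
        cases rest with
        | nil => simp at hi
        | cons q r => simp [List.take_succ_cons]
      obtain ⟨q, r, hqr⟩ := List.exists_cons_of_ne_nil hne
      simp [hqr, PySem.Chars.join_cons_cons]

-- ===== VERDICT (by name: the statement is the Claim_ definition above) =====
theorem category_split_spec : Claim_equal_category_split := by
  intro category _
  unfold Spec_category_split category_split category_split_alt
  simp only [pvFold_eq]
  simp
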